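-- pv_equiv track=rewrite | github.com/SantiagoRR2004/Modules | Modules/Utils.py | eliminateSufixes
-- ===== SOURCE A (Python) =====
-- def eliminateSufixes(dates):
--     for sufix in ["st","nd","th","rd"]:
--         for date in range(len(dates)):
--             dateParts = dates[date].split()
--             for unit in range(len(dateParts)):
--                 if dateParts[unit][0].isdigit():
--                     dateParts[unit] = dateParts[unit].replace(sufix,"")
--             dates[date] = " ".join(dateParts)
--     return dates
-- ===== SOURCE B (Python) =====
-- def eliminateSufixes(dates):
--     # One pass: split each date once, strip all four suffixes from numeric tokens, rejoin.
--     # Like the original, mutates the list in place and returns it.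
--     for i in range(len(dates)):
--         dates[i] = " ".join(
--             tok.replace("st", "").replace("nd", "").replace("th", "").replace("rd", "")
--             if tok[0].isdigit() else tok
--             for tok in dates[i].split()
--         )
--     return dates
-- ===== Notes on version B (the rewrite author's own statement) =====
-- stated objective: faster
-- what changed: One pass over the list that splits each date once and strips all four suffixes per numeric token, instead of four full passes each re-splitting and re-joining every date.
import Mathlib
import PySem

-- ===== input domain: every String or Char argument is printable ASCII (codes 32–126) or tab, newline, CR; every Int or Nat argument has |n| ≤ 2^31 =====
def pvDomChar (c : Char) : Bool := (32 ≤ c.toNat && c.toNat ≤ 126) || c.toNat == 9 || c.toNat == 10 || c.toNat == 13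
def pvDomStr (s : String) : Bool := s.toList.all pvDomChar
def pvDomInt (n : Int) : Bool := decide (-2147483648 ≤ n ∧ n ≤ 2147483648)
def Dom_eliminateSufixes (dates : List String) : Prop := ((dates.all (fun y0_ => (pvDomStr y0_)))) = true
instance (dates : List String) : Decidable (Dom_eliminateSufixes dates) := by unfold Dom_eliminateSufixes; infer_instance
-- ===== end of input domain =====

-- B strips all four suffixes in one pass per date instead of A's four split/join passes;
-- both Pythons mutate `dates` in place — the equivalence proved here is about the return value.

-- ===== PORT A =====
-- body of A's inner `for unit` loop: tok[0].isdigit() guard, then tok.replace(sufix, "")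
-- (tok[0] never raises in A: split() tokens are nonempty; Option.any renders the lookup)
def pyProcTok (sufix : String) (tok : String) : String :=
  if (PySem.Str.pyGet? tok 0).any PySem.Chars.isdigit then PySem.Str.replace tok sufix "" else tok

def eliminateSufixes (dates : List String) : List String :=
  ["st", "nd", "th", "rd"].foldl (fun ds sufix =>
    ds.map (fun date =>
      let dateParts := PySem.Str.split₀ date
      let dateParts := dateParts.map (pyProcTok sufix)
      PySem.Str.join " " dateParts)) dates

-- ===== PORT B =====
-- Source B's per-token cleaner: one guard, then the four replacements in order
def cleanTok (tok : String) : String :=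
  if (PySem.Str.pyGet? tok 0).any PySem.Chars.isdigit then
    PySem.Str.replace (PySem.Str.replace (PySem.Str.replace (PySem.Str.replace tok "st" "") "nd" "") "th" "") "rd" ""
  else tok

def eliminateSufixes_alt (dates : List String) : List String :=
  dates.map (fun date => PySem.Str.join " " ((PySem.Str.split₀ date).map cleanTok))

-- ===== PRECONDITION & SPEC =====
def Spec_eliminateSufixes (dates : List String) (out : List String) : Prop := out = eliminateSufixes_alt dates
instance (dates : List String) (out : List String) : Decidable (Spec_eliminateSufixes dates out) := by unfold Spec_eliminateSufixes; infer_instance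

-- ===== CLAIM (what is proved, stated in full; the proofs are below) =====
def Claim_equal_eliminateSufixes : Prop := ∀ (dates : List String), Dom_eliminateSufixes dates → Spec_eliminateSufixes dates (eliminateSufixes dates)

-- ===== LEMMAS AND PROOFS =====

-- Chars-level shadow of pyProcTok
def pTok (old : List Char) (t : List Char) : List Char :=
  if (t[0]?).any PySem.Chars.isdigit then PySem.Chars.replace t old [] else t

-- a token is "good" when it is nonempty and whitespace-free (true of all split() tokens)
def goodTok (t : List Char) : Prop := t ≠ [] ∧ ∀ c ∈ t, PySem.Chars.isspace c = false

-- replace.go with empty `new` only keeps characters of its input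
theorem replace_go_mem (old : List Char) (P : Char → Prop) :
    ∀ (fuel : Nat) (l acc : List Char), (∀ c ∈ l, P c) → (∀ c ∈ acc, P c) →
      ∀ c ∈ PySem.Chars.replace.go old [] fuel l acc, P c := by
  intro fuel
  induction fuel with
  | zero =>
    intro l acc hl hacc c hc
    rw [PySem.Chars.replace.go] at hc
    rcases List.mem_append.1 hc with h | h
    · exact hacc _ (List.mem_reverse.1 h)
    · exact hl _ h
  | succ n ih =>
    intro l acc hl hacc c hc
    cases l with
    | nil =>
      rw [PySem.Chars.replace.go.eq_2 _ _ _ _ (by omega)] at hc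
      exact hacc _ (List.mem_reverse.1 hc)
    | cons d t =>
      rw [PySem.Chars.replace.go] at hc
      by_cases hp : old.isPrefixOf (d :: t)
      · simp only [hp, if_true, List.reverse_nil, List.nil_append] at hc
        exact ih _ _ (fun x hx => hl x (List.mem_of_mem_drop hx)) hacc c hc
      · simp only [hp, if_false] at hc
        refine ih _ _ (fun x hx => hl x (List.mem_cons_of_mem _ hx)) ?_ c hc
        intro x hx
        rcases List.mem_cons.1 hx with rfl | hx
        · exact hl _ List.mem_cons_self
        · exact hacc _ hx

-- the accumulator just prepends (reversed)
theorem replace_go_acc (old new : List Char) :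
    ∀ (fuel : Nat) (l acc : List Char),
      PySem.Chars.replace.go old new fuel l acc = acc.reverse ++ PySem.Chars.replace.go old new fuel l [] := by
  intro fuel
  induction fuel with
  | zero => intro l acc; rw [PySem.Chars.replace.go, PySem.Chars.replace.go]; simp
  | succ n ih =>
    intro l acc
    cases l with
    | nil =>
      rw [PySem.Chars.replace.go.eq_2 _ _ _ _ (by omega),
        PySem.Chars.replace.go.eq_2 _ _ _ _ (by omega)]
      simp
    | cons d t =>
      rw [PySem.Chars.replace.go, PySem.Chars.replace.go]
      by_cases hp : old.isPrefixOf (d :: t)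
      · simp only [hp, if_true]
        rw [ih _ (new.reverse ++ acc), ih _ (new.reverse ++ [])]
        simp
      · simp only [hp, if_false]
        rw [ih t (d :: acc), ih t [d]]
        simp

-- replace with empty `new` keeps an unmatched head character
theorem replace_cons_of_not_prefix (old : List Char) (c : Char) (t : List Char)
    (hne : old ≠ []) (hp : ¬ old.isPrefixOf (c :: t)) :
    PySem.Chars.replace (c :: t) old [] = c :: PySem.Chars.replace t old [] := by
  have hoe : old.isEmpty = false := by simp [List.isEmpty_iff, hne]
  simp only [PySem.Chars.replace, hoe, Bool.false_eq_true, if_false]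
  have : (c :: t).length = t.length + 1 := rfl
  rw [this, PySem.Chars.replace.go.eq_3]
  simp only [hp, if_false]
  rw [replace_go_acc old [] t.length t [c]]
  simp

theorem replace_mem (old : List Char) (l : List Char) (hne : old ≠ []) (P : Char → Prop)
    (hl : ∀ c ∈ l, P c) : ∀ c ∈ PySem.Chars.replace l old [], P c := by
  have hoe : old.isEmpty = false := by simp [List.isEmpty_iff, hne]
  simp only [PySem.Chars.replace, hoe, Bool.false_eq_true, if_false]
  exact replace_go_mem old P l.length l [] hl (by simp)

-- split₀.go: all emitted tokens are good
theorem split_go_tokens :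
    ∀ (l cur : List Char) (acc : List (List Char)),
      (∀ t ∈ acc, goodTok t) → (∀ c ∈ cur, PySem.Chars.isspace c = false) →
      (∀ c ∈ l, PySem.Chars.isspace c = false → True) →
        ∀ t ∈ PySem.Chars.split₀.go l cur acc, goodTok t := by
  intro l
  induction l with
  | nil =>
    intro cur acc hacc hcur _ t ht
    rw [PySem.Chars.split₀.go] at ht
    by_cases hc : cur.isEmpty
    · simp only [hc, if_true] at ht
      exact hacc _ (List.mem_reverse.1 ht)
    · simp only [hc, if_false] at ht
      rw [List.reverse_cons] at ht
      rcases List.mem_append.1 ht with h | h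
      · exact hacc _ (List.mem_reverse.1 h)
      · rcases List.mem_singleton.1 h with rfl
        constructor
        · simp [List.isEmpty_iff] at hc; simpa using hc
        · intro x hx; exact hcur _ (List.mem_reverse.1 hx)
  | cons c rest ih =>
    intro cur acc hacc hcur _ t ht
    rw [PySem.Chars.split₀.go] at ht
    by_cases hs : PySem.Chars.isspace c
    · simp only [hs, if_true] at ht
      by_cases hc : cur.isEmpty
      · simp only [hc, if_true] at ht
        exact ih [] acc hacc (by simp) (by simp) t ht
      · simp only [hc, if_false] at ht
        refine ih [] _ ?_ (by simp) (by simp) t ht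
        intro u hu
        rcases List.mem_cons.1 hu with rfl | hu
        · constructor
          · simp [List.isEmpty_iff] at hc
            simpa using hc
          · intro x hx
            exact hcur _ (List.mem_reverse.1 hx)
        · exact hacc _ hu
    · simp only [hs, Bool.false_eq_true, if_false] at ht
      refine ih (c :: cur) acc hacc ?_ (by simp) t ht
      intro x hx
      rcases List.mem_cons.1 hx with rfl | hx
      · simpa using hs
      · exact hcur _ hx

theorem split₀_good (cs : List Char) : ∀ t ∈ PySem.Chars.split₀ cs, goodTok t := by
  intro t ht
  exact split_go_tokens cs [] [] (by simp) (by simp) (by simp) t ht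

-- consuming a whitespace-free word
theorem split_go_word (w : List Char) (hw : ∀ c ∈ w, PySem.Chars.isspace c = false) :
    ∀ (rest cur : List Char) (acc : List (List Char)),
      PySem.Chars.split₀.go (w ++ rest) cur acc = PySem.Chars.split₀.go rest (w.reverse ++ cur) acc := by
  induction w with
  | nil => intro rest cur acc; simp
  | cons c t ih =>
    intro rest cur acc
    have hc : PySem.Chars.isspace c = false := hw c List.mem_cons_self
    rw [List.cons_append, PySem.Chars.split₀.go]
    simp only [hc, Bool.false_eq_true, if_false]
    rw [ih (fun x hx => hw x (List.mem_cons_of_mem _ hx)) rest (c :: cur) acc]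
    simp

-- splitting a single-space join of good tokens recovers them
theorem split_join_go (parts : List (List Char)) (h : ∀ p ∈ parts, goodTok p) :
    ∀ acc : List (List Char),
      PySem.Chars.split₀.go (PySem.Chars.join [' '] parts) [] acc = acc.reverse ++ parts := by
  induction parts with
  | nil =>
    intro acc
    have hj : PySem.Chars.join [' '] ([] : List (List Char)) = [] := by
      simp [PySem.Chars.join, List.intercalate]
    rw [hj, PySem.Chars.split₀.go.eq_1]
    simp
  | cons p ps ih =>
    intro acc
    obtain ⟨hpne, hpns⟩ := h p List.mem_cons_self
    cases ps with
    | nil =>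
      have hj : PySem.Chars.join [' '] [p] = p := by
        simp [PySem.Chars.join, List.intercalate]
      rw [hj]
      have := split_go_word p hpns [] [] acc
      simp only [List.append_nil] at this
      rw [this, PySem.Chars.split₀.go.eq_1]
      have : (p.reverse ++ ([] : List Char)).isEmpty = false := by
        simp [List.isEmpty_iff, hpne]
      simp [this, hpne]
    | cons q qs =>
      have hj : PySem.Chars.join [' '] (p :: q :: qs) = p ++ ' ' :: PySem.Chars.join [' '] (q :: qs) := by
        simp [PySem.Chars.join, List.intercalate]
      rw [hj, split_go_word p hpns _ [] acc, PySem.Chars.split₀.go.eq_2]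
      rw [if_pos (by decide), if_neg (by simp [hpne])]
      rw [ih (fun x hx => h x (List.mem_cons_of_mem _ hx)) _]
      simp

theorem split_join (parts : List (List Char)) (h : ∀ p ∈ parts, goodTok p) :
    PySem.Chars.split₀ (PySem.Chars.join [' '] parts) = parts := by
  have := split_join_go parts h []
  simpa [PySem.Chars.split₀] using this

-- pTok on a good token: stays good and keeps the head character, for suffixes whose
-- first character is not a digit
theorem pTok_spec (o : Char) (os : List Char) (ho : PySem.Chars.isdigit o = false)
    (t : List Char) (hg : goodTok t) :
    goodTok (pTok (o :: os) t) ∧ (pTok (o :: os) t)[0]? = t[0]? := by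
  obtain ⟨hne, hns⟩ := hg
  cases t with
  | nil => exact absurd rfl hne
  | cons c tl =>
    unfold pTok
    by_cases hd : PySem.Chars.isdigit c
    · rw [if_pos (by simp [hd])]
      have hoc : (o == c) = false := by
        refine beq_eq_false_iff_ne.2 ?_
        intro h
        rw [h, hd] at ho
        simp at ho
      have hrep := replace_cons_of_not_prefix (o :: os) c tl (by simp)
        (by
          intro hpp
          have hpre := List.isPrefixOf_iff_prefix.1 hpp
          rw [List.cons_prefix_cons] at hpre
          exact (beq_eq_false_iff_ne.1 hoc) hpre.1)
      refine ⟨⟨by simp [hrep], ?_⟩, by simp [hrep]⟩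
      exact replace_mem (o :: os) (c :: tl) (by simp) _ hns
    · rw [if_neg (by simp [hd])]
      exact ⟨⟨hne, hns⟩, rfl⟩

-- Chars-level shadow of cleanTok
def cleanC (t : List Char) : List Char :=
  if (t[0]?).any PySem.Chars.isdigit then
    PySem.Chars.replace (PySem.Chars.replace (PySem.Chars.replace
      (PySem.Chars.replace t ['s','t'] []) ['n','d'] []) ['t','h'] []) ['r','d'] []
  else t

-- Chars-level shadow of one suffix pass of A
def stepC (old : List Char) (cs : List Char) : List Char :=
  PySem.Chars.join [' '] ((PySem.Chars.split₀ cs).map (pTok old))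

theorem pTok_pos (old t : List Char) (h : (t[0]?).any PySem.Chars.isdigit = true) :
    pTok old t = PySem.Chars.replace t old [] := by
  unfold pTok; rw [if_pos h]

theorem pTok_neg (old t : List Char) (h : (t[0]?).any PySem.Chars.isdigit = false) :
    pTok old t = t := by
  unfold pTok; rw [if_neg (by simp [h])]

theorem pyGet0 (l : List Char) : PySem.List.pyGet? l (0 : Int) = l[0]? := by
  cases l with
  | nil => simp [PySem.List.pyGet?, PySem.List.pyIdx?]
  | cons c t => simp [PySem.List.pyGet?, PySem.List.pyIdx?]

theorem pyProcTok_bridge (s : String) (t : List Char) :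
    pyProcTok s (String.ofList t) = String.ofList (pTok s.toList t) := by
  unfold pyProcTok pTok
  rw [show PySem.Str.pyGet? (String.ofList t) 0 = t[0]? by simp [pyGet0]]
  by_cases h : (t[0]?).any PySem.Chars.isdigit
  · rw [if_pos h, if_pos h]
    simp [PySem.Str.replace]
  · rw [if_neg h, if_neg h]

theorem cleanTok_bridge (t : List Char) :
    cleanTok (String.ofList t) = String.ofList (cleanC t) := by
  unfold cleanTok cleanC
  rw [show PySem.Str.pyGet? (String.ofList t) 0 = t[0]? by simp [pyGet0]]
  by_cases h : (t[0]?).any PySem.Chars.isdigit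
  · rw [if_pos h, if_pos h]
    simp [PySem.Str.replace]
  · rw [if_neg h, if_neg h]

-- four sequential replaces on a good token, guard checked once = guard re-checked each pass
theorem pTok_chain (t : List Char) (hg : goodTok t) :
    pTok ['r','d'] (pTok ['t','h'] (pTok ['n','d'] (pTok ['s','t'] t))) = cleanC t := by
  have h1 := pTok_spec 's' ['t'] (by decide) t hg
  have h2 := pTok_spec 'n' ['d'] (by decide) _ h1.1
  have h3 := pTok_spec 't' ['h'] (by decide) _ h2.1
  by_cases h : (t[0]?).any PySem.Chars.isdigit
  · have e1 : pTok ['s','t'] t = PySem.Chars.replace t ['s','t'] [] := pTok_pos _ _ h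
    have g1 : (((PySem.Chars.replace t ['s','t'] [])[0]?).any PySem.Chars.isdigit) = true := by
      rw [← e1, h1.2]; exact h
    have e2 : pTok ['n','d'] (pTok ['s','t'] t) =
        PySem.Chars.replace (PySem.Chars.replace t ['s','t'] []) ['n','d'] [] := by
      rw [e1]; exact pTok_pos _ _ g1
    have g2 : (((PySem.Chars.replace (PySem.Chars.replace t ['s','t'] []) ['n','d'] [])[0]?).any
        PySem.Chars.isdigit) = true := by
      rw [← e2, h2.2, h1.2]; exact h
    have e3 : pTok ['t','h'] (pTok ['n','d'] (pTok ['s','t'] t)) =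
        PySem.Chars.replace (PySem.Chars.replace (PySem.Chars.replace t ['s','t'] [])
          ['n','d'] []) ['t','h'] [] := by
      rw [e2]; exact pTok_pos _ _ g2
    have g3 : (((PySem.Chars.replace (PySem.Chars.replace (PySem.Chars.replace t ['s','t'] [])
        ['n','d'] []) ['t','h'] [])[0]?).any PySem.Chars.isdigit) = true := by
      rw [← e3, h3.2, h2.2, h1.2]; exact h
    rw [e3, pTok_pos _ _ g3]
    unfold cleanC
    rw [if_pos h]
  · have h' : ((t[0]?).any PySem.Chars.isdigit) = false := by simpa using h
    have e1 : pTok ['s','t'] t = t := pTok_neg _ _ h'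
    rw [e1, pTok_neg ['n','d'] t h', pTok_neg ['t','h'] t h', pTok_neg ['r','d'] t h']
    unfold cleanC
    rw [if_neg (by simp [h'])]

theorem step_parts (old : List Char) (parts : List (List Char)) (h : ∀ p ∈ parts, goodTok p) :
    stepC old (PySem.Chars.join [' '] parts) = PySem.Chars.join [' '] (parts.map (pTok old)) := by
  unfold stepC
  rw [split_join parts h]

theorem map_pTok_good (o : Char) (os : List Char) (ho : PySem.Chars.isdigit o = false)
    (parts : List (List Char)) (h : ∀ p ∈ parts, goodTok p) :
    ∀ p ∈ parts.map (pTok (o :: os)), goodTok p := by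
  intro p hp
  rcases List.mem_map.1 hp with ⟨v, hv, rfl⟩
  exact (pTok_spec o os ho v (h v hv)).1

-- the four passes of A collapse into one pass with the composed token cleaner
theorem chainC (cs : List Char) :
    stepC ['r','d'] (stepC ['t','h'] (stepC ['n','d'] (stepC ['s','t'] cs))) =
      PySem.Chars.join [' '] ((PySem.Chars.split₀ cs).map cleanC) := by
  have hts : ∀ u ∈ PySem.Chars.split₀ cs, goodTok u := split₀_good cs
  have g1 := map_pTok_good 's' ['t'] (by decide) _ hts
  have g2 := map_pTok_good 'n' ['d'] (by decide) _ g1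
  have g3 := map_pTok_good 't' ['h'] (by decide) _ g2
  rw [show stepC ['s','t'] cs =
        PySem.Chars.join [' '] ((PySem.Chars.split₀ cs).map (pTok ['s','t'])) from rfl,
      step_parts _ _ g1, step_parts _ _ g2, step_parts _ _ g3]
  simp only [List.map_map]
  refine congrArg _ (List.map_congr_left ?_)
  intro u hu
  exact pTok_chain u (hts u hu)

-- one A-pass at String level is stepC at Chars level
theorem gS_bridge (s d : String) :
    PySem.Str.join " " ((PySem.Str.split₀ d).map (pyProcTok s)) =
      String.ofList (stepC s.toList d.toList) := by
  unfold stepC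
  simp only [PySem.Str.split₀, PySem.Str.join, List.map_map]
  refine congrArg _ ?_
  refine congrArg₂ _ rfl ?_
  refine List.map_congr_left ?_
  intro t _
  simp [Function.comp, pyProcTok_bridge]

theorem alt_bridge (d : String) :
    PySem.Str.join " " ((PySem.Str.split₀ d).map cleanTok) =
      String.ofList (PySem.Chars.join [' '] ((PySem.Chars.split₀ d.toList).map cleanC)) := by
  simp only [PySem.Str.split₀, PySem.Str.join, List.map_map]
  refine congrArg _ ?_
  refine congrArg₂ _ rfl ?_
  refine List.map_congr_left ?_
  intro t _
  simp [Function.comp, cleanTok_bridge]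

-- per-date equality of the two programs
theorem date_eq (d : String) :
    PySem.Str.join " " ((PySem.Str.split₀
      (PySem.Str.join " " ((PySem.Str.split₀
        (PySem.Str.join " " ((PySem.Str.split₀
          (PySem.Str.join " " ((PySem.Str.split₀ d).map (pyProcTok "st")))).map (pyProcTok "nd")))).map
            (pyProcTok "th")))).map (pyProcTok "rd")) =
    PySem.Str.join " " ((PySem.Str.split₀ d).map cleanTok) := by
  rw [gS_bridge "st" d, gS_bridge "nd" _, gS_bridge "th" _, gS_bridge "rd" _, alt_bridge d]
  simp only [String.toList_ofList]
  rw [show ("rd" : String).toList = ['r','d'] from rfl, show ("th" : String).toList = ['t','h'] from rfl,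
      show ("nd" : String).toList = ['n','d'] from rfl, show ("st" : String).toList = ['s','t'] from rfl]
  exact congrArg _ (chainC d.toList)

-- ===== VERDICT (by name: the statement is the Claim_ definition above) =====
theorem eliminateSufixes_spec : Claim_equal_eliminateSufixes := by
  unfold Claim_equal_eliminateSufixes Spec_eliminateSufixes
  intro dates _
  unfold eliminateSufixes eliminateSufixes_alt
  simp only [List.foldl_cons, List.foldl_nil, List.map_map]
  refine List.map_congr_left ?_
  intro d _
  exact date_eq d
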